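-- pv_equiv track=rewrite | github.com/Carls13/cshb-front | duplicados.py | duplicar
-- ===== SOURCE A (Python) =====
-- def duplicar(arreglo):
--     duplicados = set()
--     i = 0
--     while i < len(arreglo):
--         j = 0
--         while j < len(arreglo):
--             if not i == j and arreglo[i] == arreglo[j]:
--                 duplicados.add(arreglo[i]*2)
--             j += 1
--         i += 1
--     return duplicados
-- ===== SOURCE B (Python) =====
-- def duplicar(arreglo):
--     conteo = {}
--     for x in arreglo:
--         conteo[x] = conteo.get(x, 0) + 1
--     return {x * 2 for x in arreglo if conteo[x] > 1}
-- ===== Notes on version B (the rewrite author's own statement) =====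
-- stated objective: faster
-- what changed: Replaced the quadratic nested index scan by a counting dict built in one pass plus a set comprehension keeping elements whose count exceeds one.
import Mathlib
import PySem

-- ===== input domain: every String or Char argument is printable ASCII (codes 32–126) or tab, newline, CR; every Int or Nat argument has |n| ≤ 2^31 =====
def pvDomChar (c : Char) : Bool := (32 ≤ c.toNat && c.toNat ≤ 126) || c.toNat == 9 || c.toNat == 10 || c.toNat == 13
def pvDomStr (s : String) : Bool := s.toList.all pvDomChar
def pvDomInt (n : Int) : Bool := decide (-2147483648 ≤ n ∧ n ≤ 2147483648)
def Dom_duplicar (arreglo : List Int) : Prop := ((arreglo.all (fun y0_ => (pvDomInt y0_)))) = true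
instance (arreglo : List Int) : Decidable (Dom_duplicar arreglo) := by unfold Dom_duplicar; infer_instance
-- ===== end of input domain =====

-- B replaces A's quadratic nested index scan by a one-pass counting dict plus a
-- conditional single pass over the list keeping elements whose count exceeds one (faster).

-- ===== PORT A =====
def duplicar (arreglo : List Int) : List Int :=
  let duplicados : PySem.Set Int := PySem.Set.empty
  (PySem.List.pyRange 0 (arreglo.length : Int) 1).foldl (fun duplicados i =>
    (PySem.List.pyRange 0 (arreglo.length : Int) 1).foldl (fun duplicados j =>
      if ¬ i = j ∧ PySem.List.pyGetD arreglo i 0 = PySem.List.pyGetD arreglo j 0 then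
        PySem.Set.add duplicados (PySem.List.pyGetD arreglo i 0 * 2)
      else duplicados) duplicados) duplicados

-- ===== PORT B =====
def duplicar_alt (arreglo : List Int) : List Int :=
  let conteo : PySem.Dict Int Int :=
    arreglo.foldl (fun d x => d.insert x (d.getD x 0 + 1)) PySem.Dict.empty
  arreglo.foldl (fun s x =>
    if conteo.getD x 0 > 1 then PySem.Set.add s (x * 2) else s) PySem.Set.empty

-- ===== PRECONDITION & SPEC =====
def Spec_duplicar (arreglo : List Int) (out : List Int) : Prop := out = duplicar_alt arreglo
instance (arreglo : List Int) (out : List Int) : Decidable (Spec_duplicar arreglo out) := by unfold Spec_duplicar; infer_instance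

-- ===== CLAIM (what is proved, stated in full; the proofs are below) =====
def Claim_equal_duplicar : Prop := ∀ (arreglo : List Int), Dom_duplicar arreglo → Spec_duplicar arreglo (duplicar arreglo)

-- ===== LEMMAS AND PROOFS =====
-- Set.add is idempotent on the element just added.
theorem pv_add_add (s : List Int) (v : Int) :
    PySem.Set.add (PySem.Set.add s v) v = PySem.Set.add s v := by
  apply PySem.Set.add_of_mem
  simp [PySem.Set.add_eq_ite]; split_ifs with h; exact h; simp

theorem pv_foldl_add_same (l : List Int) (c : Int → Prop) [DecidablePred c]
    (v : Int) (s : List Int) :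
    l.foldl (fun s j => if c j then PySem.Set.add s v else s) s =
      if ∃ j ∈ l, c j then PySem.Set.add s v else s := by
  induction l generalizing s with
  | nil => simp
  | cons x xs ih =>
    simp only [List.foldl_cons, ih]
    by_cases hx : c x
    · have hxs : ∃ j ∈ x :: xs, c j := ⟨x, List.mem_cons_self, hx⟩
      simp only [if_pos hx, if_pos hxs]
      split_ifs with h
      · exact pv_add_add s v
      · rfl
    · rw [if_neg hx]
      have hiff : (∃ j ∈ x :: xs, c j) ↔ (∃ j ∈ xs, c j) := by
        constructor
        · rintro ⟨j, hj, hc⟩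
          rcases List.mem_cons.mp hj with rfl | hj
          · exact absurd hc hx
          · exact ⟨j, hj, hc⟩
        · rintro ⟨j, hj, hc⟩
          exact ⟨j, List.mem_cons_of_mem _ hj, hc⟩
      rw [if_congr hiff rfl rfl]

theorem pv_count_two (l : List Int) (i : Nat) (hi : i < l.length) :
    (∃ j, ∃ hj : j < l.length, j ≠ i ∧ l[j] = l[i]) ↔ 2 ≤ l.count l[i] := by
  obtain ⟨x, hx⟩ : ∃ x, l[i] = x := ⟨_, rfl⟩
  rw [hx]
  have hsplit : l = l.take i ++ l[i] :: l.drop (i + 1) := by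
    conv_lhs => rw [← List.take_append_drop i l]
    rw [List.getElem_cons_drop hi]
  have hcnt : l.count x = (l.take i).count x + ((l.drop (i+1)).count x + 1) := by
    conv_lhs => rw [hsplit]
    simp [List.count_append, hx, List.count_cons_self]
  constructor
  · rintro ⟨j, hj, hne, heq⟩
    rcases Nat.lt_or_ge j i with hji | hji
    · have hmem : x ∈ l.take i := List.mem_take_iff_getElem.mpr ⟨j, by omega, heq⟩
      have := List.count_pos_iff.mpr hmem
      omega
    · have hji' : i < j := by omega
      have hmem : x ∈ l.drop (i+1) := by
        rw [List.mem_drop_iff_getElem]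
        refine ⟨j - (i+1), by omega, ?_⟩
        have hidx : i + 1 + (j - (i+1)) = j := by omega
        rw [getElem_congr rfl hidx (by omega)]
        exact heq
      have := List.count_pos_iff.mpr hmem
      omega
  · intro h2
    by_cases ht : x ∈ l.take i
    · rcases List.mem_take_iff_getElem.mp ht with ⟨j, hj, hje⟩
      exact ⟨j, by omega, by omega, hje⟩
    · by_cases hd : x ∈ l.drop (i+1)
      · rcases List.mem_drop_iff_getElem.mp hd with ⟨k, hk, hke⟩
        exact ⟨i + 1 + k, by omega, by omega, hke⟩
      · have e1 := List.count_eq_zero_of_not_mem ht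
        have e2 := List.count_eq_zero_of_not_mem hd
        omega

theorem pv_cond (arreglo : List Int) (i : Int) (h0 : 0 ≤ i) (h1 : i < (arreglo.length : Int)) :
    (∃ j ∈ PySem.List.pyRange 0 (arreglo.length : Int) 1,
        ¬ i = j ∧ PySem.List.pyGetD arreglo i 0 = PySem.List.pyGetD arreglo j 0) ↔
      1 < ((arreglo.count (PySem.List.pyGetD arreglo i 0) : Int)) := by
  have hi' : i.toNat < arreglo.length := by omega
  rw [PySem.List.pyGetD_eq_getElem arreglo 0 h0 h1]
  have hcc : (1 : Int) < (arreglo.count arreglo[i.toNat] : Int) ↔ 2 ≤ arreglo.count arreglo[i.toNat] := by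
    omega
  rw [hcc, ← pv_count_two arreglo i.toNat hi']
  constructor
  · rintro ⟨j, hjmem, hne, heq⟩
    rw [PySem.List.mem_pyRange_one] at hjmem
    rw [PySem.List.pyGetD_eq_getElem arreglo 0 hjmem.1 hjmem.2] at heq
    refine ⟨j.toNat, by omega, by omega, heq.symm⟩
  · rintro ⟨j, hj, hne, heq⟩
    refine ⟨(j : Int), PySem.List.mem_pyRange_one.mpr ⟨by omega, by omega⟩, by
      intro h; exact hne (by omega), ?_⟩
    rw [PySem.List.pyGetD_eq_getElem arreglo 0 (by omega : (0:Int) ≤ (j:Int)) (by omega)]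
    rw [getElem_congr rfl (by omega : ((j : Int)).toNat = j) (by omega)]
    exact heq.symm

theorem pv_main (arreglo : List Int) : duplicar arreglo = duplicar_alt arreglo := by
  unfold duplicar duplicar_alt
  simp only []
  -- collapse A's inner loop
  have h1 : (fun (dup : List Int) (i : Int) =>
      (PySem.List.pyRange 0 (arreglo.length : Int) 1).foldl (fun dup j =>
        if ¬ i = j ∧ PySem.List.pyGetD arreglo i 0 = PySem.List.pyGetD arreglo j 0 then
          PySem.Set.add dup (PySem.List.pyGetD arreglo i 0 * 2)
        else dup) dup) =
      (fun dup i =>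
        if ∃ j ∈ PySem.List.pyRange 0 (arreglo.length : Int) 1,
            ¬ i = j ∧ PySem.List.pyGetD arreglo i 0 = PySem.List.pyGetD arreglo j 0 then
          PySem.Set.add dup (PySem.List.pyGetD arreglo i 0 * 2)
        else dup) := by
    funext dup i
    exact pv_foldl_add_same _ _ _ dup
  rw [h1]
  -- replace the existential condition by the count condition (valid for i in the range)
  rw [PySem.List.foldl_congr_mem _ _
      (fun dup i => if 1 < ((arreglo.count (PySem.List.pyGetD arreglo i 0) : Int)) then
          PySem.Set.add dup (PySem.List.pyGetD arreglo i 0 * 2) else dup) _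
      (by
        intro acc i hi
        rw [PySem.List.mem_pyRange_one] at hi
        exact if_congr (pv_cond arreglo i hi.1 hi.2) rfl rfl)]
  -- index loop -> element loop
  rw [PySem.List.foldl_pyRange_zero_pyGetD' arreglo 0
      (fun s x => if 1 < ((arreglo.count x : Int)) then PySem.Set.add s (x * 2) else s)
      PySem.Set.empty]
  -- B side: the dict lookup is the count
  simp only [PySem.Dict.getD_foldl_insert_add_one, PySem.Dict.getD_empty, zero_add, gt_iff_lt]

-- ===== VERDICT (by name: the statement is the Claim_ definition above) =====
theorem duplicar_spec : Claim_equal_duplicar := by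
  intro arreglo _
  unfold Spec_duplicar
  exact pv_main arreglo
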